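-- pv_equiv track=rewrite | github.com/johnsonafool/agent-routine | path.py | digit_to_hour_min
-- ===== SOURCE A (Python) =====
-- def digit_to_hour_min(number: int, new_start_time: int) -> int:
--     hours = number // 100
--     minutes = number % 100
--     if minutes > 59:
--         hours += 1
--         minutes -= 60
--         new_start_time += 60
--         digit_to_hour_min(new_start_time, new_start_time)
--
--     return hours * 100 + minutes
-- ===== SOURCE B (Python) =====
-- def digit_to_hour_min(number: int, new_start_time: int) -> int:
--     # Branch-free: re-encode HHMM as total minutes, then decode back.
--     # Python's floor-mod keeps number % 100 in [0, 99], so total // 60 and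
--     # total % 60 perform exactly the single carry A's branch does.
--     total = (number // 100) * 60 + number % 100
--     return (total // 60) * 100 + total % 60
-- ===== Notes on version B (the rewrite author's own statement) =====
-- stated objective: alternative
-- what changed: Replaces the hours/minutes split with carry branch (and dead recursive call) by a branch-free change of representation: HHMM is converted to total minutes and decoded back, which performs the carry arithmetically.
import Mathlib
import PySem

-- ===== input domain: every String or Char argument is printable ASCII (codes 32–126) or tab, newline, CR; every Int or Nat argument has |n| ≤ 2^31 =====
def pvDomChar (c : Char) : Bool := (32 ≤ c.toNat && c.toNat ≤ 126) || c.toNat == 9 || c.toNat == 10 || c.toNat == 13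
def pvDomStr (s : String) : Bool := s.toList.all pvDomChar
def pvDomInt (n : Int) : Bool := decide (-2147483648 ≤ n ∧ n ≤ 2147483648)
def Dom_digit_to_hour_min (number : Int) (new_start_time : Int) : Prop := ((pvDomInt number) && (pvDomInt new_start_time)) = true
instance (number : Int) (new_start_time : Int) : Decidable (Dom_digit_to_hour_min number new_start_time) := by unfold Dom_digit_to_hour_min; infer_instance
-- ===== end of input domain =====

-- B re-encodes HHMM as total minutes and decodes back (branch-free), instead of A's split/carry-branch (alternative).


-- ===== PORT A =====
def digit_to_hour_min (number : Int) (new_start_time : Int) : Int :=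
  let hours := PySem.Int.floordiv number 100
  let minutes := PySem.Int.mod number 100
  if minutes > 59 then
    let hours := hours + 1
    let minutes := minutes - 60
    let new_start_time := new_start_time + 60
    let _ := digit_to_hour_min new_start_time new_start_time  -- result discarded, as in A
    hours * 100 + minutes
  else
    hours * 100 + minutes
termination_by
  (if PySem.Int.mod number 100 ≤ 59 then 0
   else if PySem.Int.mod (new_start_time + 60) 100 ≤ 59 then 1 else 2 : Nat)
decreasing_by
  have hm : 59 < PySem.Int.mod number 100 := by assumption
  simp only [PySem.Int.mod_eq_emod_of_pos (show (0:Int) < 100 by norm_num)] at hm ⊢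
  split_ifs <;> omega

-- ===== PORT B =====
def digit_to_hour_min_alt (number : Int) (new_start_time : Int) : Int :=
  let total := (PySem.Int.floordiv number 100) * 60 + PySem.Int.mod number 100
  (PySem.Int.floordiv total 60) * 100 + PySem.Int.mod total 60

-- ===== PRECONDITION & SPEC =====
def Spec_digit_to_hour_min (number : Int) (new_start_time : Int) (out : Int) : Prop := out = digit_to_hour_min_alt number new_start_time
instance (number : Int) (new_start_time : Int) (out : Int) : Decidable (Spec_digit_to_hour_min number new_start_time out) := by unfold Spec_digit_to_hour_min; infer_instance

-- ===== CLAIM (what is proved, stated in full; the proofs are below) =====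
def Claim_equal_digit_to_hour_min : Prop := ∀ (number : Int) (new_start_time : Int), Dom_digit_to_hour_min number new_start_time → Spec_digit_to_hour_min number new_start_time (digit_to_hour_min number new_start_time)

-- ===== LEMMAS AND PROOFS =====

-- ===== VERDICT (by name: the statement is the Claim_ definition above) =====
theorem digit_to_hour_min_spec : Claim_equal_digit_to_hour_min := by
  intro number new_start_time _
  unfold Spec_digit_to_hour_min digit_to_hour_min_alt
  rw [digit_to_hour_min]
  simp only [PySem.Int.floordiv_eq_ediv_of_pos (show (0:Int) < 100 by norm_num),
    PySem.Int.floordiv_eq_ediv_of_pos (show (0:Int) < 60 by norm_num),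
    PySem.Int.mod_eq_emod_of_pos (show (0:Int) < 100 by norm_num),
    PySem.Int.mod_eq_emod_of_pos (show (0:Int) < 60 by norm_num)]
  split_ifs <;> omega
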